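-- pv_equiv track=rewrite | github.com/VikramNoibu/gretel-path-extrapolation | .ipynb_checkpoints/utils-checkpoint.py | remove_2loops
-- ===== SOURCE A (Python) =====
-- def remove_2loops(path):
--     """remove loops of lenght 2 from a trajectory
--     to be applied after self-loops have been removed
--     """
--     pattern=set({}) # detect 2 patterns first
--     for i in range(len(path[:-3])):
--         if path[i]==path[i+2] and path[i+1]==path[i+3]:
--             pattern.add((path[i], path[i+1]))
--
--     del_index=[] #indices to be removed
--     for pat in pattern: #remove each pattern from the list
--         count =0
--         for i in range(len(path[:-1])):
--             if pat[0]==path[i] and pat[1]==path[i+1]: # if pattern match and not the first time, remove them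
--                 if count>0:
--                     del_index.extend([i, i+1])
--                 count = count + 1
--     return [path[i] for i in range(len(path)) if i not in del_index]
-- ===== SOURCE B (Python) =====
-- def remove_2loops(path):
--     """remove loops of lenght 2 from a trajectory
--     to be applied after self-loops have been removed
--     """
--     n = len(path)
--     flagged = set()  # pairs that repeat at distance 2
--     for i in range(2, n - 1):
--         if path[i] == path[i - 2] and path[i + 1] == path[i - 1]:
--             flagged.add((path[i - 2], path[i - 1]))
--     deleted = set()
--     seen = set()  # flagged pairs already encountered once
--     for i in range(n - 1):
--         p = (path[i], path[i + 1])
--         if p in flagged: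
--             if p in seen:
--                 deleted.add(i)
--                 deleted.add(i + 1)
--             else:
--                 seen.add(p)
--     return [path[i] for i in range(n) if i not in deleted]
-- ===== Notes on version B (the rewrite author's own statement) =====
-- stated objective: faster
-- what changed: Replaces A's per-pattern rescan of the whole path (one full pass for every detected pattern) by a single pass that marks repeated flagged pairs with a seen-set, so deletion indices are found in one traversal.
import Mathlib
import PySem

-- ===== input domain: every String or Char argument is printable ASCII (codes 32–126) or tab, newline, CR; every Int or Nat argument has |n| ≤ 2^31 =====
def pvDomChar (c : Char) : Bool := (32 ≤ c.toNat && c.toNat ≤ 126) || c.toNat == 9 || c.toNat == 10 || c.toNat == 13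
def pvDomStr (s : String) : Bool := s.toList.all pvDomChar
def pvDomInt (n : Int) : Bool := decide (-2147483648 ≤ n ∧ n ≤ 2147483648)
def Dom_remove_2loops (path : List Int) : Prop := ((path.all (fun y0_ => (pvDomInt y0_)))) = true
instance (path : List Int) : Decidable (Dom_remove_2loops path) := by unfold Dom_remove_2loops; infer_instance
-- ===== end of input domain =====

-- B replaces A's per-pattern rescan of the whole path by one pass with a seen-set (faster).
-- A iterates over a Python set ('for pat in pattern'); its hash order only permutes del_index,
-- whose use is pure membership, so the return value is order-independent and the port
-- (which folds over the set in insertion order) is exact.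

-- ===== PORT A =====
-- pattern = set(); for i in range(len(path[:-3])): if path[i]==path[i+2] and path[i+1]==path[i+3]: pattern.add((path[i], path[i+1]))
def patternA (path : List Int) : PySem.Set (Int × Int) :=
  (PySem.List.pyRange 0 ((PySem.List.slice path none (some (-3))).length : Int) 1).foldl
    (fun pattern i =>
      if PySem.List.pyGetD path i 0 == PySem.List.pyGetD path (i + 2) 0 &&
         PySem.List.pyGetD path (i + 1) 0 == PySem.List.pyGetD path (i + 3) 0 then
        PySem.Set.add pattern (PySem.List.pyGetD path i 0, PySem.List.pyGetD path (i + 1) 0)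
      else pattern)
    PySem.Set.empty

-- body of the inner 'for i in range(len(path[:-1]))' loop; state = (del_index, count)
def stepInnerA (path : List Int) (pat : Int × Int) (st : List Int × Int) (i : Int) : List Int × Int :=
  if pat.1 == PySem.List.pyGetD path i 0 && pat.2 == PySem.List.pyGetD path (i + 1) 0 then
    ((if st.2 > 0 then st.1 ++ [i, i + 1] else st.1), st.2 + 1)
  else st

-- del_index = []; for pat in pattern: (count = 0; inner loop)
def delIndexA (path : List Int) : List Int :=
  (patternA path).foldl
    (fun del_index pat =>
      ((PySem.List.pyRange 0 ((PySem.List.slice path none (some (-1))).length : Int) 1).foldl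
        (stepInnerA path pat) (del_index, 0)).1)
    []

-- return [path[i] for i in range(len(path)) if i not in del_index]
def remove_2loops (path : List Int) : List Int :=
  (PySem.List.pyRange 0 (path.length : Int) 1).foldl
    (fun out i =>
      if !((delIndexA path).contains i) then out ++ [PySem.List.pyGetD path i 0] else out)
    []

-- ===== PORT B =====
-- flagged = set(); for i in range(2, n-1): if path[i]==path[i-2] and path[i+1]==path[i-1]: flagged.add((path[i-2], path[i-1]))
def flaggedB (path : List Int) : PySem.Set (Int × Int) :=
  (PySem.List.pyRange 2 ((path.length : Int) - 1) 1).foldl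
    (fun flagged i =>
      if PySem.List.pyGetD path i 0 == PySem.List.pyGetD path (i - 2) 0 &&
         PySem.List.pyGetD path (i + 1) 0 == PySem.List.pyGetD path (i - 1) 0 then
        PySem.Set.add flagged (PySem.List.pyGetD path (i - 2) 0, PySem.List.pyGetD path (i - 1) 0)
      else flagged)
    PySem.Set.empty

-- body of the single 'for i in range(n-1)' pass; state = (deleted, seen)
def stepB (path : List Int) (st : PySem.Set Int × PySem.Set (Int × Int)) (i : Int) :
    PySem.Set Int × PySem.Set (Int × Int) :=
  let p := (PySem.List.pyGetD path i 0, PySem.List.pyGetD path (i + 1) 0)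
  if (flaggedB path).contains p then
    if st.2.contains p then (PySem.Set.add (PySem.Set.add st.1 i) (i + 1), st.2)
    else (st.1, PySem.Set.add st.2 p)
  else st

def stB (path : List Int) : PySem.Set Int × PySem.Set (Int × Int) :=
  (PySem.List.pyRange 0 ((path.length : Int) - 1) 1).foldl (stepB path)
    (PySem.Set.empty, PySem.Set.empty)

-- return [path[i] for i in range(n) if i not in deleted]
def remove_2loops_alt (path : List Int) : List Int :=
  (PySem.List.pyRange 0 (path.length : Int) 1).foldl
    (fun out i =>
      if !((stB path).1.contains i) then out ++ [PySem.List.pyGetD path i 0] else out)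
    []

-- ===== PRECONDITION & SPEC =====
def Spec_remove_2loops (path : List Int) (out : List Int) : Prop := out = remove_2loops_alt path
instance (path : List Int) (out : List Int) : Decidable (Spec_remove_2loops path out) := by unfold Spec_remove_2loops; infer_instance

-- ===== CLAIM (what is proved, stated in full; the proofs are below) =====
def Claim_equal_remove_2loops : Prop := ∀ (path : List Int), Dom_remove_2loops path → Spec_remove_2loops path (remove_2loops path)

-- ===== LEMMAS AND PROOFS =====

-- the pair of values starting at index i
def pairAt (path : List Int) (i : Int) : Int × Int :=
  (PySem.List.pyGetD path i 0, PySem.List.pyGetD path (i + 1) 0)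

-- index i starts a length-2 loop (the pair repeats immediately at i+2)
def IsPat (path : List Int) (i : Int) : Prop :=
  0 ≤ i ∧ i + 3 < (path.length : Int) ∧ pairAt path i = pairAt path (i + 2)

-- p is a detected looping pair value
def FlagP (path : List Int) (p : Int × Int) : Prop :=
  ∃ i : Int, IsPat path i ∧ p = pairAt path i

-- x is an index slated for deletion: part of a non-first occurrence of a flagged pair
def Del (path : List Int) (x : Int) : Prop :=
  ∃ j : Int, 0 ≤ j ∧ j + 1 < (path.length : Int) ∧ FlagP path (pairAt path j) ∧
    (∃ k : Int, 0 ≤ k ∧ k < j ∧ pairAt path k = pairAt path j) ∧ (x = j ∨ x = j + 1)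

lemma mem_foldl_set_add_if {α β : Type} [BEq β] [LawfulBEq β] (l : List α) (c : α → Bool)
    (f : α → β) (x : β) : ∀ s0 : PySem.Set β,
    x ∈ l.foldl (fun s i => if c i then PySem.Set.add s (f i) else s) s0 ↔
      x ∈ s0 ∨ ∃ i ∈ l, c i ∧ x = f i := by
  induction l with
  | nil => simp
  | cons a t ih =>
    intro s0
    rw [List.foldl_cons, ih]
    by_cases h : c a
    · rw [h]
      simp only [if_true, PySem.Set.mem_add, List.mem_cons]
      constructor
      · rintro ((hs | he) | ⟨i, hi, hc, hx⟩)
        · tauto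
        · exact Or.inr ⟨a, Or.inl rfl, h, he⟩
        · exact Or.inr ⟨i, Or.inr hi, hc, hx⟩
      · rintro (hs | ⟨i, (rfl | hi), hc, hx⟩)
        · tauto
        · tauto
        · exact Or.inr ⟨i, hi, hc, hx⟩
    · simp only [h, Bool.false_eq_true, if_false, List.mem_cons]
      constructor
      · rintro (hs | ⟨i, hi, hc, hx⟩)
        · tauto
        · exact Or.inr ⟨i, Or.inr hi, hc, hx⟩
      · rintro (hs | ⟨i, (rfl | hi), hc, hx⟩)
        · tauto
        · exact absurd hc (by simp [h])
        · exact Or.inr ⟨i, hi, hc, hx⟩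

lemma mem_patternA (path : List Int) (p : Int × Int) :
    p ∈ patternA path ↔ FlagP path p := by
  unfold patternA
  rw [mem_foldl_set_add_if]
  rw [PySem.List.slice_to_neg_ofNat path 3 (by omega)]
  unfold FlagP IsPat pairAt
  constructor
  · rintro (h | ⟨i, hi, hc, rfl⟩)
    · simp [PySem.Set.empty] at h
    · rw [PySem.List.mem_pyRange_one] at hi
      simp only [List.length_take] at hi
      refine ⟨i, ⟨hi.1, by omega, ?_⟩, rfl⟩
      simp only [Bool.and_eq_true, beq_iff_eq] at hc
      have : i + 2 + 1 = i + 3 := by ring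
      simp [hc.1, hc.2, this]
  · rintro ⟨i, ⟨h0, h3, he⟩, rfl⟩
    refine Or.inr ⟨i, ?_, ?_, rfl⟩
    · rw [PySem.List.mem_pyRange_one]
      simp only [List.length_take]
      omega
    · simp only [Prod.ext_iff] at he
      have : i + 2 + 1 = i + 3 := by ring
      rw [this] at he
      simp [he.1, he.2]

lemma mem_flaggedB (path : List Int) (p : Int × Int) :
    p ∈ flaggedB path ↔ FlagP path p := by
  unfold flaggedB
  rw [mem_foldl_set_add_if]
  unfold FlagP IsPat pairAt
  constructor
  · rintro (h | ⟨i, hi, hc, rfl⟩)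
    · simp [PySem.Set.empty] at h
    · rw [PySem.List.mem_pyRange_one] at hi
      simp only [Bool.and_eq_true, beq_iff_eq] at hc
      refine ⟨i - 2, ⟨by omega, by omega, ?_⟩, ?_⟩
      · have e1 : i - 2 + 1 = i - 1 := by ring
        have e2 : i - 2 + 2 = i := by ring
        rw [e1, e2]
        simp [hc.1, hc.2]
      · have e1 : i - 2 + 1 = i - 1 := by ring
        rw [e1]
  · rintro ⟨i, ⟨h0, h3, he⟩, rfl⟩
    refine Or.inr ⟨i + 2, ?_, ?_, ?_⟩
    · rw [PySem.List.mem_pyRange_one]; omega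
    · simp only [Prod.ext_iff] at he
      have e3 : i + 2 + 1 = i + 3 := by ring
      rw [e3] at he
      have e1 : i + 2 - 2 = i := by ring
      have e2 : i + 2 - 1 = i + 1 := by ring
      rw [e1, e2, e3]
      simp [he.1, he.2]
    · have e1 : i + 2 - 2 = i := by ring
      have e2 : i + 2 - 1 = i + 1 := by ring
      rw [e1, e2]

lemma A_inner_inv (path : List Int) (pat : Int × Int) (del0 : List Int) (m : Nat) :
    (0 ≤ ((PySem.List.pyRange 0 (m : Int) 1).foldl (stepInnerA path pat) (del0, 0)).2) ∧
    (0 < ((PySem.List.pyRange 0 (m : Int) 1).foldl (stepInnerA path pat) (del0, 0)).2 ↔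
      ∃ k : Int, 0 ≤ k ∧ k < (m : Int) ∧ pairAt path k = pat) ∧
    (∀ x : Int, x ∈ ((PySem.List.pyRange 0 (m : Int) 1).foldl (stepInnerA path pat) (del0, 0)).1 ↔
      x ∈ del0 ∨ ∃ j : Int, 0 ≤ j ∧ j < (m : Int) ∧ pairAt path j = pat ∧
        (∃ k : Int, 0 ≤ k ∧ k < j ∧ pairAt path k = pat) ∧ (x = j ∨ x = j + 1)) := by
  induction m with
  | zero =>
    rw [PySem.List.pyRange_one_eq_nil (by omega)]
    simp only [List.foldl_nil]
    refine ⟨le_refl 0, ⟨fun h => absurd h (by omega), ?_⟩, ?_⟩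
    · rintro ⟨k, h1, h2, -⟩
      push_cast at h2
      omega
    · intro x
      constructor
      · exact fun h => Or.inl h
      · rintro (h | ⟨j, h1, h2, _⟩)
        · exact h
        · omega
  | succ m ih =>
    have hr : PySem.List.pyRange 0 ((m + 1 : Nat) : Int) 1 =
        PySem.List.pyRange 0 (m : Int) 1 ++ [(m : Int)] := by
      push_cast
      exact PySem.List.pyRange_one_succ_right (by exact_mod_cast Int.natCast_nonneg m)
    rw [hr, List.foldl_append, List.foldl_cons, List.foldl_nil]
    obtain ⟨h0, hcnt, hmem⟩ := ih
    set S := (PySem.List.pyRange 0 (m : Int) 1).foldl (stepInnerA path pat) (del0, 0) with hS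
    have tiff : (pat.1 == PySem.List.pyGetD path (m : Int) 0 &&
        pat.2 == PySem.List.pyGetD path ((m : Int) + 1) 0) = true ↔ pairAt path (m : Int) = pat := by
      simp only [Bool.and_eq_true, beq_iff_eq, pairAt, Prod.ext_iff]
      constructor <;> (rintro ⟨a, b⟩; exact ⟨a.symm, b.symm⟩)
    by_cases t : pairAt path (m : Int) = pat
    · rw [stepInnerA, if_pos (tiff.mpr t)]
      refine ⟨by simp; omega, ?_, ?_⟩
      · simp only
        constructor
        · intro _; exact ⟨(m : Int), by omega, by push_cast; omega, t⟩
        · intro _; omega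
      · intro x
        by_cases hc : S.2 > 0
        · rw [if_pos hc]
          simp only [List.mem_append, List.mem_cons, hmem]
          constructor
          · rintro ((hd | ⟨j, h1, h2, h3, h4, h5⟩) | hx | hx)
            · exact Or.inl hd
            · exact Or.inr ⟨j, h1, by push_cast; omega, h3, h4, h5⟩
            · obtain ⟨k, hk1, hk2, hk3⟩ := hcnt.mp hc
              exact Or.inr ⟨(m : Int), by omega, by push_cast; omega, t, ⟨k, hk1, hk2, hk3⟩, Or.inl hx⟩
            · obtain ⟨k, hk1, hk2, hk3⟩ := hcnt.mp hc
              exact Or.inr ⟨(m : Int), by omega, by push_cast; omega, t, ⟨k, hk1, hk2, hk3⟩, Or.inr (by simpa using hx)⟩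
          · rintro (hd | ⟨j, h1, h2, h3, h4, h5⟩)
            · exact Or.inl (Or.inl hd)
            · by_cases hj : j = (m : Int)
              · subst hj
                rcases h5 with h5 | h5
                · exact Or.inr (Or.inl h5)
                · exact Or.inr (Or.inr (by simpa using h5))
              · exact Or.inl (Or.inr ⟨j, h1, by push_cast at h2 ⊢; omega, h3, h4, h5⟩)
        · rw [if_neg hc]
          rw [hmem]
          have hno : ¬ ∃ k : Int, 0 ≤ k ∧ k < (m : Int) ∧ pairAt path k = pat := by
            intro h; exact hc (hcnt.mpr h)
          constructor
          · rintro (hd | ⟨j, h1, h2, h3, h4, h5⟩)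
            · exact Or.inl hd
            · exact Or.inr ⟨j, h1, by push_cast; omega, h3, h4, h5⟩
          · rintro (hd | ⟨j, h1, h2, h3, h4, h5⟩)
            · exact Or.inl hd
            · by_cases hj : j = (m : Int)
              · subst hj
                exact absurd h4 hno
              · exact Or.inr ⟨j, h1, by push_cast at h2 ⊢; omega, h3, h4, h5⟩
    · rw [stepInnerA, if_neg (by rw [tiff]; exact t)]
      refine ⟨h0, ?_, ?_⟩
      · rw [hcnt]
        constructor
        · rintro ⟨k, h1, h2, h3⟩
          exact ⟨k, h1, by push_cast; omega, h3⟩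
        · rintro ⟨k, h1, h2, h3⟩
          refine ⟨k, h1, ?_, h3⟩
          by_cases hk : k = (m : Int)
          · subst hk; exact absurd h3 t
          · push_cast at h2 ⊢; omega
      · intro x
        rw [hmem]
        constructor
        · rintro (hd | ⟨j, h1, h2, h3, h4, h5⟩)
          · exact Or.inl hd
          · exact Or.inr ⟨j, h1, by push_cast; omega, h3, h4, h5⟩
        · rintro (hd | ⟨j, h1, h2, h3, h4, h5⟩)
          · exact Or.inl hd
          · by_cases hj : j = (m : Int)
            · subst hj; exact absurd h3 t
            · exact Or.inr ⟨j, h1, by push_cast at h2 ⊢; omega, h3, h4, h5⟩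

lemma mem_foldl_extend {β : Type} (l : List β) (g : List Int → β → List Int) (Q : β → Int → Prop)
    (hg : ∀ del pat x, x ∈ g del pat ↔ x ∈ del ∨ Q pat x) :
    ∀ (del0 : List Int) (x : Int), x ∈ l.foldl g del0 ↔ x ∈ del0 ∨ ∃ pat ∈ l, Q pat x := by
  induction l with
  | nil => simp
  | cons a t ih =>
    intro del0 x
    rw [List.foldl_cons, ih, hg]
    simp
    tauto

lemma mem_delIndexA (path : List Int) (x : Int) :
    x ∈ delIndexA path ↔ Del path x := by
  unfold delIndexA
  rw [PySem.List.slice_to_neg_one]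
  have hlen : ((path.dropLast).length : Int) = ((path.length - 1 : Nat) : Int) := by
    rw [List.length_dropLast]
  rw [hlen]
  rw [mem_foldl_extend _ _
    (fun pat x => ∃ j : Int, 0 ≤ j ∧ j < ((path.length - 1 : Nat) : Int) ∧ pairAt path j = pat ∧
      (∃ k : Int, 0 ≤ k ∧ k < j ∧ pairAt path k = pat) ∧ (x = j ∨ x = j + 1))
    (fun del pat y => (A_inner_inv path pat del (path.length - 1)).2.2 y)]
  simp only [List.not_mem_nil, false_or]
  constructor
  · rintro ⟨pat, hp, j, h1, h2, h3, h4, h5⟩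
    rw [mem_patternA] at hp
    refine ⟨j, h1, by omega, by rw [h3]; exact hp, ?_, h5⟩
    obtain ⟨k, hk1, hk2, hk3⟩ := h4
    exact ⟨k, hk1, hk2, hk3.trans h3.symm⟩
  · rintro ⟨j, h1, h2, hF, ⟨k, hk1, hk2, hk3⟩, h5⟩
    exact ⟨pairAt path j, (mem_patternA _ _).mpr hF, j, h1, by omega, rfl, ⟨k, hk1, hk2, hk3⟩, h5⟩

lemma B_loop_inv (path : List Int) (m : Nat) :
    (∀ q : Int × Int, q ∈ ((PySem.List.pyRange 0 (m : Int) 1).foldl (stepB path)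
        (PySem.Set.empty, PySem.Set.empty)).2 ↔
      q ∈ flaggedB path ∧ ∃ k : Int, 0 ≤ k ∧ k < (m : Int) ∧ pairAt path k = q) ∧
    (∀ x : Int, x ∈ ((PySem.List.pyRange 0 (m : Int) 1).foldl (stepB path)
        (PySem.Set.empty, PySem.Set.empty)).1 ↔
      ∃ j : Int, 0 ≤ j ∧ j < (m : Int) ∧ pairAt path j ∈ flaggedB path ∧
        (∃ k : Int, 0 ≤ k ∧ k < j ∧ pairAt path k = pairAt path j) ∧ (x = j ∨ x = j + 1)) := by
  induction m with
  | zero =>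
    rw [PySem.List.pyRange_one_eq_nil (by omega)]
    simp only [List.foldl_nil]
    constructor
    · intro q
      simp only [PySem.Set.empty]
      constructor
      · intro h; simp at h
      · rintro ⟨-, k, h1, h2, -⟩; push_cast at h2; omega
    · intro x
      simp only [PySem.Set.empty]
      constructor
      · intro h; simp at h
      · rintro ⟨j, h1, h2, -⟩; push_cast at h2; omega
  | succ m ih =>
    have hr : PySem.List.pyRange 0 ((m + 1 : Nat) : Int) 1 =
        PySem.List.pyRange 0 (m : Int) 1 ++ [(m : Int)] := by
      push_cast
      exact PySem.List.pyRange_one_succ_right (by exact_mod_cast Int.natCast_nonneg m)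
    rw [hr, List.foldl_append, List.foldl_cons, List.foldl_nil]
    obtain ⟨hseen, hdel⟩ := ih
    set S := (PySem.List.pyRange 0 (m : Int) 1).foldl (stepB path) (PySem.Set.empty, PySem.Set.empty) with hS
    have hpair : (PySem.List.pyGetD path (m : Int) 0, PySem.List.pyGetD path ((m : Int) + 1) 0) =
        pairAt path (m : Int) := rfl
    rw [stepB]
    simp only [hpair]
    by_cases hf : (flaggedB path).contains (pairAt path (m : Int))
    · rw [if_pos hf]
      have hfm : pairAt path (m : Int) ∈ flaggedB path := by
        simpa [PySem.Set.contains, List.contains_iff_mem] using hf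
      by_cases hs : S.2.contains (pairAt path (m : Int))
      · rw [if_pos hs]
        have hsm : pairAt path (m : Int) ∈ S.2 := by
          simpa [PySem.Set.contains, List.contains_iff_mem] using hs
        obtain ⟨-, k, hk1, hk2, hk3⟩ := (hseen _).mp hsm
        constructor
        · intro q
          rw [hseen]
          constructor
          · rintro ⟨h1, k', hk1', hk2', hk3'⟩
            exact ⟨h1, k', hk1', by push_cast; omega, hk3'⟩
          · rintro ⟨h1, k', hk1', hk2', hk3'⟩
            refine ⟨h1, ?_⟩
            by_cases hk' : k' = (m : Int)
            · subst hk'; exact ⟨k, hk1, by omega, hk3.trans hk3'⟩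
            · exact ⟨k', hk1', by push_cast at hk2' ⊢; omega, hk3'⟩
        · intro x
          simp only [PySem.Set.mem_add, hdel]
          constructor
          · rintro ((⟨j, h1, h2, h3, h4, h5⟩ | hx) | hx)
            · exact ⟨j, h1, by push_cast; omega, h3, h4, h5⟩
            · exact ⟨(m : Int), by omega, by push_cast; omega, hfm, ⟨k, hk1, hk2, hk3⟩, Or.inl hx⟩
            · exact ⟨(m : Int), by omega, by push_cast; omega, hfm, ⟨k, hk1, hk2, hk3⟩, Or.inr hx⟩
          · rintro ⟨j, h1, h2, h3, h4, h5⟩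
            by_cases hj : j = (m : Int)
            · subst hj
              rcases h5 with h5 | h5
              · exact Or.inl (Or.inr h5)
              · exact Or.inr h5
            · exact Or.inl (Or.inl ⟨j, h1, by push_cast at h2 ⊢; omega, h3, h4, h5⟩)
      · rw [if_neg hs]
        have hns : ¬ ∃ k : Int, 0 ≤ k ∧ k < (m : Int) ∧ pairAt path k = pairAt path (m : Int) := by
          intro ⟨k, h1, h2, h3⟩
          exact hs (by simp [PySem.Set.contains, (hseen _).mpr ⟨hfm, k, h1, h2, h3⟩])
        constructor
        · intro q
          simp only [PySem.Set.mem_add, hseen]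
          constructor
          · rintro (⟨h1, k', hk1', hk2', hk3'⟩ | rfl)
            · exact ⟨h1, k', hk1', by push_cast; omega, hk3'⟩
            · exact ⟨hfm, (m : Int), by omega, by push_cast; omega, rfl⟩
          · rintro ⟨h1, k', hk1', hk2', hk3'⟩
            by_cases hk' : k' = (m : Int)
            · subst hk'; exact Or.inr hk3'.symm
            · exact Or.inl ⟨h1, k', hk1', by push_cast at hk2' ⊢; omega, hk3'⟩
        · intro x
          rw [hdel]
          constructor
          · rintro ⟨j, h1, h2, h3, h4, h5⟩
            exact ⟨j, h1, by push_cast; omega, h3, h4, h5⟩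
          · rintro ⟨j, h1, h2, h3, h4, h5⟩
            by_cases hj : j = (m : Int)
            · subst hj; exact absurd h4 hns
            · exact ⟨j, h1, by push_cast at h2 ⊢; omega, h3, h4, h5⟩
    · rw [if_neg hf]
      have hfm : ¬ pairAt path (m : Int) ∈ flaggedB path := by
        intro h; exact hf (by simp [PySem.Set.contains, h])
      constructor
      · intro q
        rw [hseen]
        constructor
        · rintro ⟨h1, k', hk1', hk2', hk3'⟩
          exact ⟨h1, k', hk1', by push_cast; omega, hk3'⟩
        · rintro ⟨h1, k', hk1', hk2', hk3'⟩
          by_cases hk' : k' = (m : Int)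
          · subst hk'; rw [← hk3'] at h1; exact absurd h1 hfm
          · exact ⟨h1, k', hk1', by push_cast at hk2' ⊢; omega, hk3'⟩
      · intro x
        rw [hdel]
        constructor
        · rintro ⟨j, h1, h2, h3, h4, h5⟩
          exact ⟨j, h1, by push_cast; omega, h3, h4, h5⟩
        · rintro ⟨j, h1, h2, h3, h4, h5⟩
          by_cases hj : j = (m : Int)
          · subst hj; exact absurd h3 hfm
          · exact ⟨j, h1, by push_cast at h2 ⊢; omega, h3, h4, h5⟩

lemma mem_deletedB (path : List Int) (x : Int) :
    x ∈ (stB path).1 ↔ Del path x := by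
  unfold stB
  have hr : PySem.List.pyRange 0 ((path.length : Int) - 1) 1 =
      PySem.List.pyRange 0 ((path.length - 1 : Nat) : Int) 1 := by
    rcases Nat.eq_zero_or_pos path.length with h | h
    · rw [h]
      norm_num
    · have he : ((path.length : Int) - 1) = ((path.length - 1 : Nat) : Int) := by omega
      rw [he]
  rw [hr, (B_loop_inv path (path.length - 1)).2 x]
  unfold Del
  constructor
  · rintro ⟨j, h1, h2, h3, h4, h5⟩
    exact ⟨j, h1, by omega, (mem_flaggedB _ _).mp h3, h4, h5⟩
  · rintro ⟨j, h1, h2, h3, h4, h5⟩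
    exact ⟨j, h1, by omega, (mem_flaggedB _ _).mpr h3, h4, h5⟩

-- ===== VERDICT (by name: the statement is the Claim_ definition above) =====
theorem remove_2loops_spec : Claim_equal_remove_2loops := by
  intro path _
  unfold Spec_remove_2loops remove_2loops remove_2loops_alt
  rw [PySem.List.foldl_append_if, PySem.List.foldl_append_if]
  have h : ∀ i : Int, (delIndexA path).contains i = ((stB path).1.contains i) := by
    intro i
    have := (mem_delIndexA path i).trans (mem_deletedB path i).symm
    simp only [PySem.Set.contains]
    simp [this]
  simp only [h]
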